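-- pv_equiv track=rewrite | github.com/ariuk44/retake_exam_prep | day_29.py | sumIsPower
-- ===== SOURCE A (Python) =====
-- def sumIsPower(arr):
--     if len(arr) == 0:
--         return False
--     total = 0
--     for i in arr:
--         total += i
--     power = 1
--     while power < total:
--         power *= 2
--     return power == total
-- ===== SOURCE B (Python) =====
-- def sumIsPower(arr):
--     if len(arr) == 0:
--         return False
--     total = sum(arr)
--     if total <= 0:
--         return False
--     while total % 2 == 0:
--         total //= 2
--     return total == 1
-- ===== Notes on version B (the rewrite author's own statement) =====
-- stated objective: alternative
-- what changed: Replaces A's upward loop that doubles power until it reaches the sum with the reverse decomposition: reject non-positive sums, strip factors of 2 from the sum, and test whether 1 remains.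
import Mathlib
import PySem

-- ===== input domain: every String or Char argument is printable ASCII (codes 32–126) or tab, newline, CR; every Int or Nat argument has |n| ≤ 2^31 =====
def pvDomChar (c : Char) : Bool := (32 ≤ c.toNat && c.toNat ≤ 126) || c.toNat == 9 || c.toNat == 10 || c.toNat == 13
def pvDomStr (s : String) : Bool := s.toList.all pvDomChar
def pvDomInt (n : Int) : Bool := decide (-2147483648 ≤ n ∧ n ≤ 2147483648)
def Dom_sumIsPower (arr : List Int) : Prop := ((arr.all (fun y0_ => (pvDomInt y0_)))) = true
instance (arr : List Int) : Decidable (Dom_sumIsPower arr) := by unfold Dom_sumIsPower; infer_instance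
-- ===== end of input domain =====

-- B replaces A's upward doubling loop (power *= 2 until power >= total) by the downward
-- decomposition: reject total <= 0, strip factors of 2, test the remainder against 1.

-- ===== PORT A =====
-- A's while loop: power *= 2 while power < total; terminates since power > 0 doubles.
def pvGrow (total power : Int) (hp : 0 < power) : Int :=
  if _h : power < total then pvGrow total (2 * power) (by omega) else power
termination_by (total - power).toNat
decreasing_by omega

def sumIsPower (arr : List Int) : Bool :=
  if arr.length = 0 then false
  else
    let total := arr.foldl (fun t i => t + i) 0
    decide (pvGrow total 1 (by omega) = total)

-- ===== PORT B =====
-- B's while loop: total //= 2 while total % 2 == 0 (only reached with total > 0).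
def pvStrip (t : Int) (ht : 0 < t) : Int :=
  if h : PySem.Int.mod t 2 = 0 then
    pvStrip (PySem.Int.floordiv t 2)
      (by rw [PySem.Int.mod_eq_emod_of_pos (by omega)] at h
          rw [PySem.Int.floordiv_eq_ediv_of_pos (by omega)]; omega)
  else t
termination_by t.toNat
decreasing_by
  rw [PySem.Int.floordiv_eq_ediv_of_pos (by omega)]
  omega

def sumIsPower_alt (arr : List Int) : Bool :=
  if arr.length = 0 then false
  else
    let total := arr.sum
    if h : total ≤ 0 then false
    else decide (pvStrip total (by omega) = 1)

-- ===== PRECONDITION & SPEC =====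
def Spec_sumIsPower (arr : List Int) (out : Bool) : Prop := out = sumIsPower_alt arr
instance (arr : List Int) (out : Bool) : Decidable (Spec_sumIsPower arr out) := by unfold Spec_sumIsPower; infer_instance

-- ===== CLAIM (what is proved, stated in full; the proofs are below) =====
def Claim_equal_sumIsPower : Prop := ∀ (arr : List Int), Dom_sumIsPower arr → Spec_sumIsPower arr (sumIsPower arr)

-- ===== LEMMAS AND PROOFS =====

-- A's loop result equals total iff total = 2^k * power for some k.
theorem pvGrow_eq_iff (total power : Int) (hp : 0 < power) :
    pvGrow total power hp = total ↔ ∃ k : ℕ, total = 2 ^ k * power := by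
  constructor
  · intro h
    induction power, hp using pvGrow.induct total with
    | case1 power hp hlt ih =>
      rw [pvGrow, dif_pos hlt] at h
      obtain ⟨k, hk⟩ := ih h
      exact ⟨k + 1, by rw [hk]; ring⟩
    | case2 power hp hlt =>
      rw [pvGrow, dif_neg hlt] at h
      exact ⟨0, by omega⟩
  · rintro ⟨k, hk⟩
    induction k generalizing power with
    | zero =>
      rw [pvGrow, dif_neg (by omega)]; omega
    | succ k ih =>
      have h1 : (1 : Int) ≤ 2 ^ k := one_le_pow₀ (by omega)
      have hlt : power < total :=
        calc power < 2 * power := by omega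
        _ ≤ 2 ^ k * (2 * power) := le_mul_of_one_le_left (by omega) h1
        _ = total := by rw [hk]; ring
      rw [pvGrow, dif_pos hlt]
      exact ih (2 * power) (by omega) (by rw [hk]; ring)

-- B's loop result equals 1 iff t = 2^k for some k.
theorem pvStrip_eq_iff (t : Int) (ht : 0 < t) :
    pvStrip t ht = 1 ↔ ∃ k : ℕ, t = 2 ^ k := by
  constructor
  · intro h
    induction t, ht using pvStrip.induct with
    | case1 t ht hm ih =>
      rw [pvStrip, dif_pos hm] at h
      obtain ⟨k, hk⟩ := ih h
      refine ⟨k + 1, ?_⟩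
      rw [PySem.Int.floordiv_eq_ediv_of_pos (by omega)] at hk
      rw [PySem.Int.mod_eq_emod_of_pos (by omega)] at hm
      omega
    | case2 t ht hm =>
      rw [pvStrip, dif_neg hm] at h
      exact ⟨0, by omega⟩
  · rintro ⟨k, hk⟩
    induction k generalizing t with
    | zero =>
      have hm : ¬ PySem.Int.mod t 2 = 0 := by
        rw [PySem.Int.mod_eq_emod_of_pos (by omega)]; omega
      rw [pvStrip, dif_neg hm]; omega
    | succ k ih =>
      have h2 : t = 2 * 2 ^ k := by rw [hk]; ring
      have h1 : (1 : Int) ≤ 2 ^ k := one_le_pow₀ (by omega)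
      have hm : PySem.Int.mod t 2 = 0 := by
        rw [PySem.Int.mod_eq_emod_of_pos (by omega)]; omega
      rw [pvStrip, dif_pos hm]
      have hd : PySem.Int.floordiv t 2 = 2 ^ k := by
        rw [PySem.Int.floordiv_eq_ediv_of_pos (by omega)]; omega
      exact ih (PySem.Int.floordiv t 2)
        (by rw [PySem.Int.floordiv_eq_ediv_of_pos (by omega)]; omega) hd

theorem foldl_add_eq_sum (arr : List Int) (a : Int) :
    arr.foldl (fun t i => t + i) a = a + arr.sum := by
  induction arr generalizing a with
  | nil => simp
  | cons x xs ih => simp [List.foldl, ih, List.sum_cons]; ring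

-- ===== VERDICT (by name: the statement is the Claim_ definition above) =====
theorem sumIsPower_spec : Claim_equal_sumIsPower := by
  intro arr _
  unfold Spec_sumIsPower sumIsPower sumIsPower_alt
  by_cases hlen : arr.length = 0
  · simp [hlen]
  · simp only [if_neg hlen, foldl_add_eq_sum, zero_add]
    set s := arr.sum with hs
    by_cases hpos : s ≤ 0
    · rw [dif_pos hpos]
      simp only [decide_eq_false_iff_not]
      rw [pvGrow_eq_iff]
      rintro ⟨k, hk⟩
      have h1 : (1 : Int) ≤ 2 ^ k := one_le_pow₀ (by omega)
      omega
    · rw [dif_neg hpos]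
      simp only [decide_eq_decide]
      rw [pvGrow_eq_iff, pvStrip_eq_iff]
      simp [mul_one]
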